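-- pv_equiv track=rewrite | github.com/atanughosh01/Network-Simulations | 1_ErrorDetection/src/packages/LRC.py | gen_LRC
-- ===== SOURCE A (Python) =====
-- def gen_VRC(data: str) -> str:
--     count = 0
--     for i in data:
--         if i == '1': count += 1
--     if count % 2 != 0: vrc_bit = '1'
--     else: vrc_bit = '0'
--     return vrc_bit
--
-- def gen_LRC(data: str) -> str:
--     packet_list = []
--     for count in range(0, 32, 8):
--         packet = data[count: count+8]
--         if len(packet) < 8:
--             packet = '0'*(8-len(packet)) + packet
--         packet_list.append(packet)
--
--     lrc_bit = ""
--     for i in range(0, 8):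
--         temp = ""
--         for j in range(0, 4): temp += packet_list[j][i]
--         lrc_bit += gen_VRC(temp)
--
--     return lrc_bit
-- ===== SOURCE B (Python) =====
-- def gen_LRC(data: str) -> str:
--     acc = [0] * 8
--     for count in range(0, 32, 8):
--         packet = data[count: count + 8]
--         packet = '0' * (8 - len(packet)) + packet
--         acc = [a ^ (1 if ch == '1' else 0) for a, ch in zip(acc, packet)]
--     return ''.join('1' if a else '0' for a in acc)
-- ===== Notes on version B (the rewrite author's own statement) =====
-- stated objective: simpler
-- what changed: B drops the gen_VRC helper and the per-column temp strings: it folds the four packets through a single 8-slot xor parity accumulator (packet-outer, bit-inner) and renders the accumulator at the end, instead of building a 4-char column string per bit and counting its '1's.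
import Mathlib
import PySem

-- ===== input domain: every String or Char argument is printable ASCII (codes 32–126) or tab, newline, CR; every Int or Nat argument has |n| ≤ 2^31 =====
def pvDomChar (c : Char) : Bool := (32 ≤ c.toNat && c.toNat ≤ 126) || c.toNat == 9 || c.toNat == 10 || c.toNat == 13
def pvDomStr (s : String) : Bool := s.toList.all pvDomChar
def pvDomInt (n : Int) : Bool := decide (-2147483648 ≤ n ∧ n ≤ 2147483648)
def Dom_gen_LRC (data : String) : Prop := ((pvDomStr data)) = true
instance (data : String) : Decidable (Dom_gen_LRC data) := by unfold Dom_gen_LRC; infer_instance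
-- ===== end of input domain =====

-- B replaces A's per-column temp-string + gen_VRC counting helper with a single
-- parity-accumulator fold over the four packets (objective: simpler; same cost).


-- ===== PORT A =====
-- helper gen_VRC of A, on the char list of its string argument (its one-char result as chars)
def pvGenVRC (s : List Char) : List Char :=
  let count := s.foldl (fun c i => if i = '1' then c + 1 else c) (0 : Int)
  if PySem.Int.mod count 2 ≠ 0 then ['1'] else ['0']

def gen_LRC (data : String) : String :=
  let packet_list :=
    (PySem.List.pyRange 0 32 8).foldl (fun pl count =>
      let packet := PySem.List.slice data.toList (some count) (some (count + 8))
      let packet := if packet.length < 8 then List.replicate (8 - packet.length) '0' ++ packet else packet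
      pl ++ [packet]) []
  let lrc_bit :=
    (PySem.List.pyRange 0 8 1).foldl (fun lrc i =>
      let temp :=
        (PySem.List.pyRange 0 4 1).foldl (fun t j =>
          t ++ [PySem.List.pyGetD (PySem.List.pyGetD packet_list j []) i ' ']) []
      lrc ++ pvGenVRC temp) []
  String.mk lrc_bit

-- ===== PORT B =====
def gen_LRC_alt (data : String) : String :=
  let acc :=
    (PySem.List.pyRange 0 32 8).foldl (fun acc count =>
      let packet := PySem.List.slice data.toList (some count) (some (count + 8))
      let packet := List.replicate (8 - packet.length) '0' ++ packet
      List.zipWith (fun a ch => PySem.Int.bxor a (if ch = '1' then 1 else 0)) acc packet)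
      (List.replicate 8 (0 : Int))
  String.mk (acc.map (fun a => if a ≠ 0 then '1' else '0'))

-- ===== PRECONDITION & SPEC =====
def Spec_gen_LRC (data : String) (out : String) : Prop := out = gen_LRC_alt data
instance (data : String) (out : String) : Decidable (Spec_gen_LRC data out) := by unfold Spec_gen_LRC; infer_instance

-- ===== CLAIM (what is proved, stated in full; the proofs are below) =====
def Claim_equal_gen_LRC : Prop := ∀ (data : String), Dom_gen_LRC data → Spec_gen_LRC data (gen_LRC data)

-- ===== LEMMAS AND PROOFS =====

-- a list of length 8 is an explicit 8-tuple of chars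
lemma pvEight (l : List Char) (h : l.length = 8) :
    ∃ a b c d e f g h', l = [a, b, c, d, e, f, g, h'] := by
  rcases l with _ | ⟨a, _ | ⟨b, _ | ⟨c, _ | ⟨d, _ | ⟨e, _ | ⟨f, _ | ⟨g, _ | ⟨h8, t⟩⟩⟩⟩⟩⟩⟩⟩ <;>
    simp_all

-- A's gen_VRC of a 4-char column equals B's xor-accumulated parity bit
lemma pvVrcCol (a b c d : Char) :
    pvGenVRC [a, b, c, d] =
      [if PySem.Int.bxor (PySem.Int.bxor (PySem.Int.bxor (PySem.Int.bxor 0 (if a = '1' then 1 else 0)) (if b = '1' then 1 else 0)) (if c = '1' then 1 else 0)) (if d = '1' then 1 else 0) ≠ 0 then '1' else '0'] := by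
  by_cases ha : a = '1' <;> by_cases hb : b = '1' <;> by_cases hc : c = '1' <;> by_cases hd : d = '1' <;>
    simp [pvGenVRC, ha, hb, hc, hd] <;> decide

-- A's conditional left-padding equals B's unconditional one (for packets of length ≤ 8)
lemma pvPadEq (l : List Char) (h : l.length ≤ 8) :
    (if l.length < 8 then List.replicate (8 - l.length) '0' ++ l else l) =
      List.replicate (8 - l.length) '0' ++ l := by
  split_ifs with h'
  · rfl
  · have h8 : l.length = 8 := by omega
    simp [h8]

lemma pvPadLen (l : List Char) (h : l.length ≤ 8) :
    (List.replicate (8 - l.length) '0' ++ l).length = 8 := by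
  simp; omega

lemma pvSliceLen (s : List Char) (c : Int) (hc : 0 ≤ c) :
    (PySem.List.slice s (some c) (some (c + 8))).length ≤ 8 := by
  rw [PySem.List.slice_toNat s hc (by omega)]
  simp only [List.length_take]
  omega

-- ===== VERDICT (by name: the statement is the Claim_ definition above) =====
theorem gen_LRC_spec : Claim_equal_gen_LRC := by
  intro data _
  unfold Spec_gen_LRC gen_LRC gen_LRC_alt
  simp only [show PySem.List.pyRange 0 32 8 = [0, 8, 16, 24] from by decide,
             show PySem.List.pyRange 0 8 1 = [0, 1, 2, 3, 4, 5, 6, 7] from by decide,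
             show PySem.List.pyRange 0 4 1 = [0, 1, 2, 3] from by decide,
             List.foldl]
  rw [pvPadEq _ (pvSliceLen data.toList 0 (by norm_num)),
      pvPadEq _ (pvSliceLen data.toList 8 (by norm_num)),
      pvPadEq _ (pvSliceLen data.toList 16 (by norm_num)),
      pvPadEq _ (pvSliceLen data.toList 24 (by norm_num))]
  have hl0 := pvPadLen _ (pvSliceLen data.toList 0 (by norm_num))
  have hl8 := pvPadLen _ (pvSliceLen data.toList 8 (by norm_num))
  have hl16 := pvPadLen _ (pvSliceLen data.toList 16 (by norm_num))
  have hl24 := pvPadLen _ (pvSliceLen data.toList 24 (by norm_num))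
  generalize hq0 : List.replicate (8 - (PySem.List.slice data.toList (some 0) (some (0 + 8))).length) '0' ++ PySem.List.slice data.toList (some 0) (some (0 + 8)) = q0 at *
  generalize hq1 : List.replicate (8 - (PySem.List.slice data.toList (some 8) (some (8 + 8))).length) '0' ++ PySem.List.slice data.toList (some 8) (some (8 + 8)) = q1 at *
  generalize hq2 : List.replicate (8 - (PySem.List.slice data.toList (some 16) (some (16 + 8))).length) '0' ++ PySem.List.slice data.toList (some 16) (some (16 + 8)) = q2 at *
  generalize hq3 : List.replicate (8 - (PySem.List.slice data.toList (some 24) (some (24 + 8))).length) '0' ++ PySem.List.slice data.toList (some 24) (some (24 + 8)) = q3 at *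
  obtain ⟨a0,a1,a2,a3,a4,a5,a6,a7,rfl⟩ := pvEight q0 hl0
  obtain ⟨b0,b1,b2,b3,b4,b5,b6,b7,rfl⟩ := pvEight q1 hl8
  obtain ⟨c0,c1,c2,c3,c4,c5,c6,c7,rfl⟩ := pvEight q2 hl16
  obtain ⟨d0,d1,d2,d3,d4,d5,d6,d7,rfl⟩ := pvEight q3 hl24
  simp [PySem.List.pyGetD, PySem.List.pyGet?, PySem.List.pyIdx?, pvVrcCol]
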